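-- pv_equiv track=rewrite | github.com/kaleem-01/CausalSynergy | metrics/graph.py | count_true_negatives
-- ===== SOURCE A (Python) =====
-- def count_true_negatives(true_edges, learned_edges, nodes, tolerate_undirected=False):
--     """
--     Count true negatives (TN) in structure learning evaluation.
--
--     Args:
--         true_edges (set): Set of true directed edges (tuples: (u,v))
--         learned_edges (set): Set of learned directed edges (tuples: (u,v))
--         nodes (list or set): All node names
--         tolerate_undirected (bool): If True, reversed edges count as matches
--
--     Returns:
--         int: number of true negatives
--     """
--     # Build universe of all possible directed edges
--     all_edges = {(u, v) for u in nodes for v in nodes if u != v}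
--
--     # True positives and false positives
--     tp, fp, fn = 0, 0, 0
--
--     for edge in learned_edges:
--         if edge in true_edges:
--             tp += 1
--         elif tolerate_undirected and (edge[1], edge[0]) in true_edges:
--             tp += 1
--         else:
--             fp += 1
--
--     for edge in true_edges:
--         if edge not in learned_edges:
--             if tolerate_undirected and (edge[1], edge[0]) in learned_edges:
--                 continue
--             fn += 1
--
--     # TN = everything else
--     tn = len(all_edges) - (tp + fp + fn)
--     return tn
-- ===== SOURCE B (Python) =====
-- def count_true_negatives(true_edges, learned_edges, nodes, tolerate_undirected=False):
--     # Closed-form universe size d*(d-1) with d = len(set(nodes)); every learned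
--     # edge is tp or fp, so tp+fp = len(learned_edges); one pass counts fn.
--     d = len(set(nodes))
--     learned = set(learned_edges)
--     fn = 0
--     for edge in true_edges:
--         if edge not in learned:
--             if tolerate_undirected and (edge[1], edge[0]) in learned:
--                 continue
--             fn += 1
--     return d * (d - 1) - len(learned_edges) - fn
-- ===== Notes on version B (the rewrite author's own statement) =====
-- stated objective: faster
-- what changed: B replaces A's O(n^2) construction of the full edge universe by the closed form d*(d-1) with d=len(set(nodes)), and drops A's learned-edge loop entirely since every learned edge contributes exactly 1 to tp+fp, leaving a single pass over true_edges.
import Mathlib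
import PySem

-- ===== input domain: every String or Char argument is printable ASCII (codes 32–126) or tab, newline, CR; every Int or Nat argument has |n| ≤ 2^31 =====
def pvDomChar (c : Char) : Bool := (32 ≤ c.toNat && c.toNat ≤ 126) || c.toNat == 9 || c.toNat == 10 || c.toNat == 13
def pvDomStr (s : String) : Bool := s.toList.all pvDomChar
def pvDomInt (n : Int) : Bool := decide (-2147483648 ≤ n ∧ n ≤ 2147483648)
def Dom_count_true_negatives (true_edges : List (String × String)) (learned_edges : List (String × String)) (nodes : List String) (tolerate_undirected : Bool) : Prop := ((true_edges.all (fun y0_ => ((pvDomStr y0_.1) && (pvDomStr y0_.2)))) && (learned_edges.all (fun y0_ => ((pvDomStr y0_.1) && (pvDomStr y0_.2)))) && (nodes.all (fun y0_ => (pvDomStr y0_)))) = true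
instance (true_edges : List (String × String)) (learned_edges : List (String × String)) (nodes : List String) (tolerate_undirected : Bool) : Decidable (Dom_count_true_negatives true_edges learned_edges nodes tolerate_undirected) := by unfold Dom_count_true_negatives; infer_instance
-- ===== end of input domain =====

-- B replaces A's quadratic universe construction by the closed form d*(d-1), d = len(set(nodes)),
-- and drops A's learned-edge loop (tp+fp = len(learned_edges)); objective: faster.

-- ===== PORT A =====
def count_true_negatives (true_edges : List (String × String)) (learned_edges : List (String × String)) (nodes : List String) (tolerate_undirected : Bool) : Int :=
  -- all_edges = {(u, v) for u in nodes for v in nodes if u != v}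
  let all_edges : PySem.Set (String × String) :=
    PySem.Set.ofList (nodes.flatMap (fun u => nodes.filterMap (fun v => if u ≠ v then some (u, v) else none)))
  -- tp, fp, fn = 0, 0, 0; for edge in learned_edges: …
  let s : Int × Int := learned_edges.foldl (fun (s : Int × Int) edge =>
      if edge ∈ true_edges then (s.1 + 1, s.2)
      else if tolerate_undirected && decide ((edge.2, edge.1) ∈ true_edges) then (s.1 + 1, s.2)
      else (s.1, s.2 + 1)) (0, 0)
  -- for edge in true_edges: …
  let fn : Int := true_edges.foldl (fun (fn : Int) edge =>
      if edge ∉ learned_edges then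
        (if tolerate_undirected && decide ((edge.2, edge.1) ∈ learned_edges) then fn else fn + 1)
      else fn) 0
  PySem.Set.len all_edges - (s.1 + s.2 + fn)

-- ===== PORT B =====
def count_true_negatives_alt (true_edges : List (String × String)) (learned_edges : List (String × String)) (nodes : List String) (tolerate_undirected : Bool) : Int :=
  let d : Int := PySem.Set.len (PySem.Set.ofList nodes)
  let learned : PySem.Set (String × String) := PySem.Set.ofList learned_edges
  let fn : Int := true_edges.foldl (fun (fn : Int) edge =>
      if !(PySem.Set.contains learned edge) then
        (if tolerate_undirected && PySem.Set.contains learned (edge.2, edge.1) then fn else fn + 1)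
      else fn) 0
  d * (d - 1) - PySem.List.len learned_edges - fn

-- ===== PRECONDITION & SPEC =====
def Spec_count_true_negatives (true_edges : List (String × String)) (learned_edges : List (String × String)) (nodes : List String) (tolerate_undirected : Bool) (out : Int) : Prop := out = count_true_negatives_alt true_edges learned_edges nodes tolerate_undirected
instance (true_edges : List (String × String)) (learned_edges : List (String × String)) (nodes : List String) (tolerate_undirected : Bool) (out : Int) : Decidable (Spec_count_true_negatives true_edges learned_edges nodes tolerate_undirected out) := by unfold Spec_count_true_negatives; infer_instance

-- ===== CLAIM (what is proved, stated in full; the proofs are below) =====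
def Claim_equal_count_true_negatives : Prop := ∀ (true_edges : List (String × String)) (learned_edges : List (String × String)) (nodes : List String) (tolerate_undirected : Bool), Dom_count_true_negatives true_edges learned_edges nodes tolerate_undirected → Spec_count_true_negatives true_edges learned_edges nodes tolerate_undirected (count_true_negatives true_edges learned_edges nodes tolerate_undirected)

-- ===== LEMMAS AND PROOFS =====

-- the tp/fp fold adds exactly 1 per learned edge
theorem fold_tpfp_sum (l : List (String × String)) (te : List (String × String)) (t : Bool) (a b : Int) :
    (l.foldl (fun (s : Int × Int) edge =>
      if edge ∈ te then (s.1 + 1, s.2)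
      else if t && decide ((edge.2, edge.1) ∈ te) then (s.1 + 1, s.2)
      else (s.1, s.2 + 1)) (a, b)).1 +
    (l.foldl (fun (s : Int × Int) edge =>
      if edge ∈ te then (s.1 + 1, s.2)
      else if t && decide ((edge.2, edge.1) ∈ te) then (s.1 + 1, s.2)
      else (s.1, s.2 + 1)) (a, b)).2 = a + b + l.length := by
  induction l generalizing a b with
  | nil => simp
  | cons x xs ih =>
    rw [List.foldl_cons]
    split_ifs <;> · simp only [ih]; simp; ring

-- the two fn folds agree (set membership = list membership)
theorem fn_folds_eq (te le : List (String × String)) (t : Bool) (a : Int) :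
    te.foldl (fun (fn : Int) edge =>
      if edge ∉ le then
        (if t && decide ((edge.2, edge.1) ∈ le) then fn else fn + 1)
      else fn) a =
    te.foldl (fun (fn : Int) edge =>
      if !(PySem.Set.contains (PySem.Set.ofList le) edge) then
        (if t && PySem.Set.contains (PySem.Set.ofList le) (edge.2, edge.1) then fn else fn + 1)
      else fn) a := by
  apply PySem.List.foldl_congr_mem
  intro fn edge _
  have h1 : PySem.Set.contains (PySem.Set.ofList le) edge = decide (edge ∈ le) := by
    by_cases h : edge ∈ le <;>
      simp [PySem.Set.mem_ofList, h]
  have h2 : PySem.Set.contains (PySem.Set.ofList le) (edge.2, edge.1) = decide ((edge.2, edge.1) ∈ le) := by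
    by_cases h : (edge.2, edge.1) ∈ le <;>
      simp [PySem.Set.mem_ofList, h]
  rw [h1, h2]
  by_cases h : edge ∈ le <;> simp [h]

-- a nodup list minus one present element, counted
theorem filter_ne_length {α : Type} [DecidableEq α] (l : List α) (u : α) (h : l.Nodup) (hu : u ∈ l) :
    (l.filter (fun v => u ≠ v)).length = l.length - 1 := by
  induction l with
  | nil => cases hu
  | cons x xs ih =>
    rcases List.mem_cons.mp hu with rfl | hx
    · have hxs : xs.filter (fun v => u ≠ v) = xs :=
        List.filter_eq_self.2 (fun v hv => by
          have huv : u ≠ v := by rintro rfl; exact (List.nodup_cons.mp h).1 hv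
          simp [huv])
      rw [List.filter_cons, if_neg (by simp), hxs, List.length_cons]
      omega
    · have hxne : u ≠ x := by
        rintro rfl
        exact (List.nodup_cons.mp h).1 hx
      have h1 : 1 ≤ xs.length := List.length_pos_of_mem hx
      rw [List.filter_cons, if_pos (by simpa using hxne)]
      simp only [List.length_cons, ih (List.nodup_cons.mp h).2 hx]
      omega

-- |{(u,v) : u,v ∈ nodes, u ≠ v}| = d*(d-1)
theorem universe_size (nodes : List String) :
    ((PySem.Set.ofList (nodes.flatMap (fun u => nodes.filterMap (fun v => if u ≠ v then some (u, v) else none)))).length : Int) =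
    ((PySem.Set.ofList nodes).length : Int) * (((PySem.Set.ofList nodes).length : Int) - 1) := by
  set S := PySem.Set.ofList nodes with hS
  have hSnodup : S.Nodup := PySem.Set.nodup_ofList nodes
  set M := S.flatMap (fun u => (S.filter (fun v => u ≠ v)).map (fun v => (u, v))) with hM
  have hMnodup : M.Nodup := by
    rw [hM, List.nodup_flatMap]
    constructor
    · intro u _
      exact (hSnodup.filter _).map (fun a b hab => by simpa using hab)
    · refine hSnodup.imp ?_
      intro u1 u2 hne x h1 h2
      simp only [List.mem_map, List.mem_filter] at h1 h2
      obtain ⟨v1, _, rfl⟩ := h1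
      obtain ⟨v2, _, he⟩ := h2
      exact hne (congrArg Prod.fst he).symm
  have hmem : ∀ p : String × String,
      p ∈ PySem.Set.ofList (nodes.flatMap (fun u => nodes.filterMap (fun v => if u ≠ v then some (u, v) else none))) ↔ p ∈ M := by
    intro p
    simp only [PySem.Set.mem_ofList, List.mem_flatMap, List.mem_filterMap, hM,
      List.mem_map, List.mem_filter, hS, PySem.Set.mem_ofList]
    constructor
    · rintro ⟨u, hu, v, hv, hsome⟩
      by_cases h : u ≠ v
      · simp only [if_pos h] at hsome
        cases hsome
        exact ⟨u, hu, v, ⟨hv, by simpa using h⟩, rfl⟩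
      · simp [if_neg h] at hsome
    · rintro ⟨u, hu, v, ⟨hv, hne⟩, rfl⟩
      have h : u ≠ v := by simpa using hne
      exact ⟨u, hu, v, hv, by simp [h]⟩
  have hperm : (PySem.Set.ofList (nodes.flatMap (fun u => nodes.filterMap (fun v => if u ≠ v then some (u, v) else none)))).Perm M :=
    (List.perm_ext_iff_of_nodup (PySem.Set.nodup_ofList _) hMnodup).2 hmem
  have hlen : (PySem.Set.ofList (nodes.flatMap (fun u => nodes.filterMap (fun v => if u ≠ v then some (u, v) else none)))).length = M.length :=
    hperm.length_eq
  have hMlen : M.length = S.length * (S.length - 1) := by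
    rw [hM, List.length_flatMap]
    have hmapeq : S.map (fun u => ((S.filter (fun v => u ≠ v)).map (fun v => (u, v))).length) =
        S.map (fun _ => S.length - 1) := by
      apply List.map_congr_left
      intro u hu
      rw [List.length_map]
      exact filter_ne_length S u hSnodup hu
    rw [hmapeq, List.map_const', List.sum_replicate, smul_eq_mul]
  rw [hlen, hMlen]
  rcases Nat.eq_zero_or_pos S.length with h0 | hpos
  · simp [h0]
  · push_cast [Nat.cast_sub hpos]
    ring

-- ===== VERDICT (by name: the statement is the Claim_ definition above) =====
theorem count_true_negatives_spec : Claim_equal_count_true_negatives := by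
  intro te le nodes t _
  unfold Spec_count_true_negatives count_true_negatives count_true_negatives_alt
  simp only
  rw [fn_folds_eq]
  have hs := fold_tpfp_sum le te t 0 0
  have hu := universe_size nodes
  simp only [PySem.Set.len, PySem.List.len]
  rw [hu, hs]
  push_cast
  ring
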